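-- pv_equiv track=rewrite | github.com/gogotape/yandex_algorithms_6.0 | homework2/taskE/taskE.py | find_order_of_deleting_medians
-- ===== SOURCE A (Python) =====
-- def find_order_of_deleting_medians(arr: list[int]) -> list[int]:
--
--     arr.sort()
--
--     order_of_deleting = []
--
--     while arr:
--         if len(arr) % 2 == 0:
--             ind = len(arr) // 2 - 1
--         else:
--             ind = len(arr) // 2
--         order_of_deleting.append(arr.pop(ind))
--
--     return order_of_deleting
-- ===== SOURCE B (Python) =====
-- def find_order_of_deleting_medians(arr: list[int]) -> list[int]:
--     arr.sort()
--     n = len(arr)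
--     if n == 0:
--         return []
--     m = (n - 1) // 2
--     lower = list(reversed(arr[:m]))
--     upper = arr[m + 1:]
--     if n % 2:
--         first, second = lower, upper
--     else:
--         first, second = upper, lower
--     pair = []
--     for a, b in zip(first, second):
--         pair.append(a)
--         pair.append(b)
--     k = min(len(first), len(second))
--     tail = first[k:] if len(first) > len(second) else second[k:]
--     return [arr[m]] + pair + tail
-- ===== Notes on version B (the rewrite author's own statement) =====
-- stated objective: faster
-- what changed: Instead of repeatedly popping the median from a shrinking list (a linear-time pop per step), B sorts once and emits the answer in one pass as a closed-form interleaving: the lower median first, then the elements below it (descending) zipped with the elements above it (ascending).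
import Mathlib
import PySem

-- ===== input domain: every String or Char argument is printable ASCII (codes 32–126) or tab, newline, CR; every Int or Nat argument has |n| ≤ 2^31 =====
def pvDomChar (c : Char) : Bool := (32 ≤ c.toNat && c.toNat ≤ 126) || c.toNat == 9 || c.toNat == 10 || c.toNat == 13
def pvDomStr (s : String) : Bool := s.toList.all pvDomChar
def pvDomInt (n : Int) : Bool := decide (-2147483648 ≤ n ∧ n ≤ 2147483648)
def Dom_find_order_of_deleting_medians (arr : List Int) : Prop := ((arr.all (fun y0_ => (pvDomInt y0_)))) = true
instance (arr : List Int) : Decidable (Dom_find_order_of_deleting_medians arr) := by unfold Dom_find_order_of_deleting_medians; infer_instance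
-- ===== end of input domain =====

-- B replaces A's repeated median-popping with one sort plus a closed-form interleaving pass.
-- Equivalence is about the RETURN value only: Python A empties its argument in place, B only sorts it.

-- ===== PORT A =====
-- while arr: pop the lower median, appending the popped values
def pvGoA (l : List Int) : List Int :=
  if _hl : l = [] then []
  else
    match hp : PySem.List.pop? l
      (if PySem.Int.mod (l.length : Int) 2 = 0 then PySem.Int.floordiv (l.length : Int) 2 - 1
       else PySem.Int.floordiv (l.length : Int) 2) with
    | some vr => vr.1 :: pvGoA vr.2
    | none => []
termination_by l.length
decreasing_by
  have := PySem.List.length_of_pop?_eq_some _ hp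
  omega

def find_order_of_deleting_medians (arr : List Int) : List Int :=
  pvGoA (PySem.List.sorted arr id)

-- ===== PORT B =====
-- the zip loop of Source B: append a, then b, for each zipped pair
def pvInterleavePairs : List Int → List Int → List Int
  | a :: xs, b :: ys => a :: b :: pvInterleavePairs xs ys
  | _, _ => []

-- everything Source B does after arr.sort()
def pvAltBody (s : List Int) : List Int :=
  let n := s.length
  if n = 0 then []
  else
    let m := (n - 1) / 2
    let lower := (PySem.List.slice s none (some (m : Int))).reverse
    let upper := PySem.List.slice s (some ((m : Int) + 1)) none
    let fs := if n % 2 ≠ 0 then (lower, upper) else (upper, lower)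
    let pair := pvInterleavePairs fs.1 fs.2
    let k := min fs.1.length fs.2.length
    let tail := if fs.2.length < fs.1.length then PySem.List.slice fs.1 (some (k : Int)) none
                else PySem.List.slice fs.2 (some (k : Int)) none
    PySem.List.pyGetD s (m : Int) 0 :: (pair ++ tail)

def find_order_of_deleting_medians_alt (arr : List Int) : List Int :=
  pvAltBody (PySem.List.sorted arr id)

-- ===== PRECONDITION & SPEC =====
def Spec_find_order_of_deleting_medians (arr : List Int) (out : List Int) : Prop := out = find_order_of_deleting_medians_alt arr
instance (arr : List Int) (out : List Int) : Decidable (Spec_find_order_of_deleting_medians arr out) := by unfold Spec_find_order_of_deleting_medians; infer_instance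

-- ===== CLAIM (what is proved, stated in full; the proofs are below) =====
def Claim_equal_find_order_of_deleting_medians : Prop := ∀ (arr : List Int), Dom_find_order_of_deleting_medians arr → Spec_find_order_of_deleting_medians arr (find_order_of_deleting_medians arr)

-- ===== LEMMAS AND PROOFS =====

-- total interleaving with remainder: pvIvl (x::xs) ys = x :: pvIvl ys xs
def pvIvl : List Int → List Int → List Int
  | [], ys => ys
  | x :: xs, ys => x :: pvIvl ys xs
termination_by xs ys => xs.length + ys.length

lemma pvIvl_nil (ys : List Int) : pvIvl [] ys = ys := by simp [pvIvl]

lemma pvIvl_cons (x : Int) (xs ys : List Int) : pvIvl (x :: xs) ys = x :: pvIvl ys xs := by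
  simp [pvIvl]

lemma pvIvl_nil_right : ∀ xs : List Int, pvIvl xs [] = xs
  | [] => pvIvl_nil []
  | x :: xs => by rw [pvIvl_cons, pvIvl_nil]

-- Source B's pair ++ tail equals the total interleaving
lemma pv_ip_tail : ∀ (xs ys : List Int),
    pvInterleavePairs xs ys ++
      (if ys.length < xs.length then xs.drop (min xs.length ys.length)
       else ys.drop (min xs.length ys.length)) = pvIvl xs ys
  | [], ys => by simp [pvInterleavePairs, pvIvl_nil]
  | x :: xs, [] => by simp [pvInterleavePairs, pvIvl_nil_right]
  | x :: xs, y :: ys => by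
    have ih := pv_ip_tail xs ys
    rw [pvIvl_cons, pvIvl_cons]
    simp only [pvInterleavePairs, List.length_cons, Nat.succ_min_succ, List.drop_succ_cons,
      List.cons_append, Nat.add_lt_add_iff_right]
    rw [ih]

-- removing the element between the two halves
lemma pvEraseMid : ∀ (low : List Int) (x : Int) (up : List Int),
    (low ++ x :: up).eraseIdx low.length = low ++ up
  | [], x, up => by simp
  | a :: low, x, up => by simp [List.eraseIdx_cons_succ, pvEraseMid low x up]

-- one iteration of A's while loop: pop index (len-1)/2 (both parities agree on this)
lemma pvGoA_step (l : List Int) (hl : l ≠ []) :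
    pvGoA l = l.getD ((l.length - 1) / 2) 0 :: pvGoA (l.eraseIdx ((l.length - 1) / 2)) := by
  have hn : 0 < l.length := List.length_pos_iff.mpr hl
  have hm : (if PySem.Int.mod (l.length : Int) 2 = 0 then PySem.Int.floordiv (l.length : Int) 2 - 1
      else PySem.Int.floordiv (l.length : Int) 2) = (((l.length - 1) / 2 : Nat) : Int) := by
    unfold PySem.Int.mod PySem.Int.floordiv
    rw [Int.fdiv_eq_ediv, Int.fmod_eq_emod]
    simp only [show ((0:Int) ≤ 2 ∨ (2:Int) ∣ (l.length:Int)) = True by simp, if_true, add_zero,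
      sub_zero]
    split <;> omega
  rw [pvGoA.eq_def, dif_neg hl]
  split
  · rename_i vr hp
    rw [hm, PySem.List.pop?_natCast _ _ (by omega : (l.length - 1) / 2 < l.length)] at hp
    injection hp with hp
    subst hp
    rw [List.getD_eq_getElem _ _ (by omega)]
  · rename_i hp
    rw [hm, PySem.List.pop?_natCast _ _ (by omega : (l.length - 1) / 2 < l.length)] at hp
    simp at hp

-- the heart: on low ++ x :: up with balanced halves, A's loop yields x then the interleaving
lemma pvPQ (n : Nat) : ∀ (low up : List Int) (x : Int), low.length + up.length + 1 = n →
    (up.length = low.length → pvGoA (low ++ x :: up) = x :: pvIvl low.reverse up) ∧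
    (up.length = low.length + 1 → pvGoA (low ++ x :: up) = x :: pvIvl up low.reverse) := by
  induction n using Nat.strong_induction_on with
  | _ n ih =>
    intro low up x hn
    constructor
    · -- odd shape: |up| = |low|
      intro h
      have hne : (low ++ x :: up) ≠ [] := by simp
      have hm : (((low ++ x :: up).length - 1) / 2) = low.length := by simp; omega
      have hget : (low ++ x :: up).getD low.length 0 = x := by
        rw [List.getD_eq_getElem _ _ (by simp)]
        simp
      rw [pvGoA_step _ hne, hm, hget, pvEraseMid]
      rcases eq_or_ne low [] with hlo | hlo
      · subst hlo
        have hup : up = [] := by simpa using h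
        subst hup
        rw [pvGoA.eq_def]
        simp [pvIvl_nil]
      · have hlow : 0 < low.length := List.length_pos_iff.mpr hlo
        have hdec : low.dropLast ++ low.getLast hlo :: up = low ++ up := by
          conv_rhs => rw [← List.dropLast_append_getLast hlo]
          simp
        have hrev : low.reverse = low.getLast hlo :: low.dropLast.reverse := by
          conv_lhs => rw [← List.dropLast_append_getLast hlo]
          simp
        have hlast : low.dropLast.length = low.length - 1 := by simp
        have hQ := (ih (n - 1) (by omega) low.dropLast up (low.getLast hlo)
          (by rw [hlast]; omega)).2 (by rw [hlast]; omega)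
        rw [hdec] at hQ
        rw [hQ, hrev, pvIvl_cons]
    · -- even shape: |up| = |low| + 1
      intro h
      rcases up with _ | ⟨u, ut⟩
      · simp at h
      have hu : ut.length = low.length := by simpa using h
      have hne : (low ++ x :: u :: ut) ≠ [] := by simp
      have hm : (((low ++ x :: u :: ut).length - 1) / 2) = low.length := by simp; omega
      have hget : (low ++ x :: u :: ut).getD low.length 0 = x := by
        rw [List.getD_eq_getElem _ _ (by simp)]
        simp
      rw [pvGoA_step _ hne, hm, hget, pvEraseMid]
      have hP := (ih (n - 1) (by omega) low ut u (by omega)).1 hu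
      rw [hP, pvIvl_cons]

-- B's body, written with take/drop and pvIvl
lemma pvAlt_char (l : List Int) (hl : l ≠ []) :
    pvAltBody l = l.getD ((l.length - 1) / 2) 0 ::
      (if l.length % 2 ≠ 0 then
        pvIvl (l.take ((l.length - 1) / 2)).reverse (l.drop ((l.length - 1) / 2 + 1))
       else
        pvIvl (l.drop ((l.length - 1) / 2 + 1)) (l.take ((l.length - 1) / 2)).reverse) := by
  have hn : 0 < l.length := List.length_pos_iff.mpr hl
  unfold pvAltBody
  simp only [if_neg (by omega : ¬ l.length = 0)]
  have hup : PySem.List.slice l (some ((((l.length - 1) / 2 : Nat) : Int) + 1)) none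
      = l.drop ((l.length - 1) / 2 + 1) := by
    have hcast : (((l.length - 1) / 2 : Nat) : Int) + 1 = (((l.length - 1) / 2 + 1 : Nat) : Int) := by
      push_cast; ring
    rw [hcast, PySem.List.slice_from_natCast]
  rw [PySem.List.slice_to_natCast, hup, PySem.List.pyGetD_natCast]
  by_cases hpar : l.length % 2 ≠ 0
  · rw [if_pos hpar, if_pos hpar]
    dsimp only
    rw [PySem.List.slice_from_natCast, PySem.List.slice_from_natCast, pv_ip_tail]
  · rw [if_neg hpar, if_neg hpar]
    dsimp only
    rw [PySem.List.slice_from_natCast, PySem.List.slice_from_natCast, pv_ip_tail]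

lemma pv_main (s : List Int) : pvGoA s = pvAltBody s := by
  rcases eq_or_ne s [] with hs | hs
  · subst hs
    rw [pvGoA.eq_def]
    rfl
  · have hn : 0 < s.length := List.length_pos_iff.mpr hs
    have hmlt : (s.length - 1) / 2 < s.length := by omega
    have hsplit : s.take ((s.length - 1) / 2) ++ s[(s.length - 1) / 2] :: s.drop ((s.length - 1) / 2 + 1) = s := by
      rw [← List.drop_eq_getElem_cons hmlt, List.take_append_drop]
    have htake : (s.take ((s.length - 1) / 2)).length = (s.length - 1) / 2 := by simp; omega
    have hdrop : (s.drop ((s.length - 1) / 2 + 1)).length = s.length - ((s.length - 1) / 2 + 1) := by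
      simp
    rw [pvAlt_char s hs, List.getD_eq_getElem _ _ hmlt]
    by_cases hpar : s.length % 2 ≠ 0
    · rw [if_pos hpar]
      have hP := (pvPQ s.length (s.take ((s.length - 1) / 2)) (s.drop ((s.length - 1) / 2 + 1))
        s[(s.length - 1) / 2] (by rw [htake, hdrop]; omega)).1 (by rw [htake, hdrop]; omega)
      rw [hsplit] at hP
      exact hP
    · rw [if_neg hpar]
      have hQ := (pvPQ s.length (s.take ((s.length - 1) / 2)) (s.drop ((s.length - 1) / 2 + 1))
        s[(s.length - 1) / 2] (by rw [htake, hdrop]; omega)).2 (by rw [htake, hdrop]; omega)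
      rw [hsplit] at hQ
      exact hQ

-- ===== VERDICT (by name: the statement is the Claim_ definition above) =====
theorem find_order_of_deleting_medians_spec : Claim_equal_find_order_of_deleting_medians := by
  intro arr _
  unfold Spec_find_order_of_deleting_medians find_order_of_deleting_medians find_order_of_deleting_medians_alt
  exact pv_main _
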